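-- pv_equiv track=rewrite | github.com/FamALouiz/motip | src/permutation/strategy/greedy.py | _select_slice_indices_for_interleaving
-- ===== SOURCE A (Python) =====
-- def _select_slice_indices_for_interleaving(
--     desired_free: list[int], left_free: set[int], right_free: set[int]
-- ) -> set[int]:
--     """Pick indices to treat as sliced when desired free order is interleaved.
--
--     We keep the longest subsequence matching the representable pattern `L*R*`
--     and mark all remaining indices as sliced.
--     """
--     sides = ["L" if idx in left_free else "R" for idx in desired_free]
--     n = len(sides)
--
--     best_keep = -1
--     best_switch = 0
--     prefix_left_counts = [0] * (n + 1)
--     suffix_right_counts = [0] * (n + 1)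
--
--     for i in range(n):
--         prefix_left_counts[i + 1] = prefix_left_counts[i] + (1 if sides[i] == "L" else 0)
--
--     for i in range(n - 1, -1, -1):
--         suffix_right_counts[i] = suffix_right_counts[i + 1] + (1 if sides[i] == "R" else 0)
--
--     for switch in range(n + 1):
--         keep = prefix_left_counts[switch] + suffix_right_counts[switch]
--         if keep > best_keep:
--             best_keep = keep
--             best_switch = switch
--
--     sliced: set[int] = set()
--     for i, idx in enumerate(desired_free):
--         keep = (i < best_switch and sides[i] == "L") or (i >= best_switch and sides[i] == "R")
--         if not keep:
--             sliced.add(idx)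
--
--     return sliced
-- ===== SOURCE B (Python) =====
-- def _select_slice_indices_for_interleaving(
--     desired_free: list[int], left_free: set[int], right_free: set[int]
-- ) -> set[int]:
--     """Single-pass running-balance version: the best L*R* switch point is the
--     first prefix maximizing (#L - #R); prefix/suffix count arrays are unnecessary."""
--     sides = ["L" if idx in left_free else "R" for idx in desired_free]
--     balance = 0
--     best_balance = 0
--     best_switch = 0
--     for i, side in enumerate(sides):
--         balance += 1 if side == "L" else -1
--         if balance > best_balance:
--             best_balance = balance
--             best_switch = i + 1
--     sliced: set[int] = set()
--     for i, idx in enumerate(desired_free):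
--         if not ((i < best_switch and sides[i] == "L") or (i >= best_switch and sides[i] == "R")):
--             sliced.add(idx)
--     return sliced
-- ===== Notes on version B (the rewrite author's own statement) =====
-- stated objective: simpler
-- what changed: Replaced the prefix-left/suffix-right count arrays and the separate argmax scan over all switch points by a single running-balance pass (+1 for L, -1 for R) that tracks the first prefix maximizing the balance, which is the same best switch point.
import Mathlib
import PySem

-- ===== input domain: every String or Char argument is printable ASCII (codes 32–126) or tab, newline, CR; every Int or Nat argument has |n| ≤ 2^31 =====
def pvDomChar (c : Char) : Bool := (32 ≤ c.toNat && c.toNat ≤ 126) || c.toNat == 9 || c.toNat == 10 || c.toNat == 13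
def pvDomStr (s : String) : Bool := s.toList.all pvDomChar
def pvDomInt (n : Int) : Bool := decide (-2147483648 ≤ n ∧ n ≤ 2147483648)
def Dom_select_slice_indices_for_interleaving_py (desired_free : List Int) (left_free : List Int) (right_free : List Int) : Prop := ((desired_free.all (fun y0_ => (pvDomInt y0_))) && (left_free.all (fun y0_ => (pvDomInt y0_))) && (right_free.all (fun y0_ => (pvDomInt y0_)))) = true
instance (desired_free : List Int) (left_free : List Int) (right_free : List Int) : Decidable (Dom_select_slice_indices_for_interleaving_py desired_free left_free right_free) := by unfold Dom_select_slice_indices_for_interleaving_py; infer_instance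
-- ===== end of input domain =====

-- B replaces A's prefix/suffix count arrays and switch-point argmax scan by one
-- running-balance pass (objective: simpler); same return value everywhere.

-- ===== PORT A =====
-- shared line of both Pythons: sides = ["L" if idx in left_free else "R" for idx in desired_free]
def pvSides (desired_free : List Int) (left_free : List Int) : List String :=
  desired_free.map (fun idx => if PySem.Set.contains left_free idx then "L" else "R")

-- shared final loop of both Pythons: for i, idx in enumerate(desired_free): keep = …; if not keep: sliced.add(idx)
def pvSliced (desired_free : List Int) (sides : List String) (best_switch : Int) : List Int :=
  (PySem.List.enumerate desired_free).foldl
    (fun (sliced : List Int) p =>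
      if (p.1 < best_switch ∧ PySem.List.pyGetD sides p.1 "" = "L") ∨
         (best_switch ≤ p.1 ∧ PySem.List.pyGetD sides p.1 "" = "R")
      then sliced else PySem.Set.add sliced p.2)
    PySem.Set.empty

-- literal port of A; the loop indices from range(n)/range(n-1,-1,-1) are the
-- naturals 0..n-1, so the folds run over List.range n (and its reverse) exactly.
def select_slice_indices_for_interleaving_py (desired_free : List Int) (left_free : List Int) (right_free : List Int) : List Int :=
  let sides := pvSides desired_free left_free
  let n := sides.length
  let prefix_left_counts := (List.range n).foldl
    (fun acc i => acc.set (i+1) (acc.getD i 0 + (if sides.getD i "" == "L" then 1 else 0)))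
    (List.replicate (n+1) (0:Int))
  let suffix_right_counts := (List.range n).reverse.foldl
    (fun acc i => acc.set i (acc.getD (i+1) 0 + (if sides.getD i "" == "R" then 1 else 0)))
    (List.replicate (n+1) (0:Int))
  let st := (List.range (n+1)).foldl
    (fun (st : Int × Int) s =>
      let keep := prefix_left_counts.getD s 0 + suffix_right_counts.getD s 0
      if keep > st.1 then (keep, (s : Int)) else st)
    (-1, 0)
  pvSliced desired_free sides st.2

-- ===== PORT B =====
def select_slice_indices_for_interleaving_py_alt (desired_free : List Int) (left_free : List Int) (right_free : List Int) : List Int :=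
  let sides := pvSides desired_free left_free
  let st := (PySem.List.enumerate sides).foldl
    (fun (st : Int × Int × Int) p =>
      let balance := st.1 + (if p.2 == "L" then 1 else -1)
      if balance > st.2.1 then (balance, balance, p.1 + 1) else (balance, st.2.1, st.2.2))
    (0, 0, 0)
  pvSliced desired_free sides st.2.2

-- ===== PRECONDITION & SPEC =====
def Spec_select_slice_indices_for_interleaving_py (desired_free : List Int) (left_free : List Int) (right_free : List Int) (out : List Int) : Prop := out = select_slice_indices_for_interleaving_py_alt desired_free left_free right_free
instance (desired_free : List Int) (left_free : List Int) (right_free : List Int) (out : List Int) : Decidable (Spec_select_slice_indices_for_interleaving_py desired_free left_free right_free out) := by unfold Spec_select_slice_indices_for_interleaving_py; infer_instance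

-- ===== CLAIM (what is proved, stated in full; the proofs are below) =====
def Claim_equal_select_slice_indices_for_interleaving_py : Prop := ∀ (desired_free : List Int) (left_free : List Int) (right_free : List Int), Dom_select_slice_indices_for_interleaving_py desired_free left_free right_free → Spec_select_slice_indices_for_interleaving_py desired_free left_free right_free (select_slice_indices_for_interleaving_py desired_free left_free right_free)

-- ===== LEMMAS AND PROOFS =====

-- running balance of the first k sides: #L - #R
def pvBal (sides : List String) (k : Nat) : Int :=
  ((sides.take k).countP (fun s => s == "L") : Int) - ((sides.take k).countP (fun s => s == "R") : Int)

-- (best balance over prefixes 0..k, first switch index attaining it)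
def pvBest (sides : List String) : Nat → Int × Int
  | 0 => (0, 0)
  | k+1 =>
    let p := pvBest sides k
    if pvBal sides (k+1) > p.1 then (pvBal sides (k+1), (k:Int)+1) else p

theorem pvSides_mem {desired_free left_free : List Int} {x : String}
    (h : x ∈ pvSides desired_free left_free) : x = "L" ∨ x = "R" := by
  simp only [pvSides, List.mem_map] at h
  obtain ⟨i, _, hi⟩ := h
  split at hi <;> simp_all

theorem pvBal_succ (sides : List String) (k : Nat) (hk : k < sides.length)
    (hlr : sides[k] = "L" ∨ sides[k] = "R") :
    pvBal sides (k+1) = pvBal sides k + (if sides[k] == "L" then 1 else -1) := by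
  unfold pvBal
  rw [List.take_add_one, List.getElem?_eq_getElem hk]
  rcases hlr with h | h <;> simp [List.countP_append, h] <;> omega

theorem prefArr_inv (sides : List String) (k : Nat) (hk : k ≤ sides.length) :
    (List.range k).foldl
      (fun acc i => acc.set (i+1) (acc.getD i 0 + (if sides.getD i "" == "L" then 1 else 0)))
      (List.replicate (sides.length+1) (0:Int))
    = (List.range (k+1)).map (fun s => ((sides.take s).countP (fun x => x == "L") : Int))
        ++ List.replicate (sides.length - k) (0:Int) := by
  induction k with
  | zero => simp [List.replicate_succ]
  | succ k ih =>
    rw [List.range_succ, List.foldl_append, ih (by omega)]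
    have hk' : k < sides.length := by omega
    have hlen : ((List.range (k+1)).map (fun s => (((sides.take s).countP (fun x => x == "L")) : Int))).length = k + 1 := by simp
    simp only [List.foldl_cons, List.foldl_nil]
    rw [List.getD_append _ _ _ _ (by simp)]
    rw [List.set_append_right _ _ (by omega)]
    have hnk : sides.length - k = (sides.length - (k+1)) + 1 := by omega
    rw [hnk, List.replicate_succ, hlen]
    simp only [Nat.sub_self, List.set_cons_zero]
    rw [List.range_succ (n := k+1), List.map_append, List.append_assoc]
    congr 1
    simp only [List.map_cons, List.map_nil, List.singleton_append]
    congr 1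
    rw [List.getD_eq_getElem?_getD, List.getElem?_map, List.getElem?_range (by omega)]
    simp only [Option.map_some, Option.getD_some]
    rw [List.take_add_one, List.getElem?_eq_getElem hk', List.countP_append]
    have hg : sides.getD k "" = sides[k] := by
      rw [List.getD_eq_getElem?_getD, List.getElem?_eq_getElem hk']; rfl
    rw [hg]
    by_cases h : sides[k] == "L" <;> simp [h]

theorem sufArr_inv (sides : List String) (d k : Nat) (hk : k + d = sides.length) :
    ((List.range' k d).reverse).foldl
      (fun acc i => acc.set i (acc.getD (i+1) 0 + (if sides.getD i "" == "R" then 1 else 0)))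
      (List.replicate (sides.length+1) (0:Int))
    = List.replicate k (0:Int)
        ++ (List.range (d+1)).map (fun j => ((sides.drop (k+j)).countP (fun x => x == "R") : Int)) := by
  induction d generalizing k with
  | zero =>
    simp only [List.range', List.reverse_nil, List.foldl_nil]
    have : k = sides.length := by omega
    subst this
    simp [List.replicate_succ', List.drop_length]
  | succ d ih =>
    rw [List.range'_succ, List.reverse_cons, List.foldl_append, ih (k+1) (by omega)]
    have hk' : k < sides.length := by omega
    simp only [List.foldl_cons, List.foldl_nil]
    rw [List.getD_eq_getElem?_getD, List.getElem?_append_right (by simp),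
        List.length_replicate, Nat.sub_self, List.getElem?_map, List.getElem?_range (by omega)]
    simp only [Option.map_some, Option.getD_some, Nat.add_zero]
    rw [List.replicate_succ' (n := k), List.append_assoc, List.singleton_append,
        List.set_append_right _ _ (by simp), List.length_replicate, Nat.sub_self, List.set_cons_zero]
    rw [List.range_succ_eq_map (n := d+1), List.map_cons, List.map_map]
    congr 1
    congr 1
    · simp only [Nat.add_zero]
      rw [List.drop_eq_getElem_cons hk', List.countP_cons]
      have hg : sides.getD k "" = sides[k] := by
        rw [List.getD_eq_getElem?_getD, List.getElem?_eq_getElem hk']; rfl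
      rw [hg]
      by_cases h : sides[k] == "R" <;> simp [h]
    · apply List.map_congr_left
      intro j hj
      have h2 : k + (j+1) = k+1+j := by omega
      simp [Function.comp, h2]

theorem keep_eq (sides : List String) (s : Nat) :
    (((sides.take s).countP (fun x => x == "L") : Int)) + (((sides.drop s).countP (fun x => x == "R") : Int))
    = ((sides.countP (fun x => x == "R") : Int)) + pvBal sides s := by
  have h : sides.countP (fun x => x == "R")
      = (sides.take s).countP (fun x => x == "R") + (sides.drop s).countP (fun x => x == "R") := by
    conv_lhs => rw [← List.take_append_drop s sides]
    rw [List.countP_append]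
  unfold pvBal
  omega

theorem argmaxA_inv (sides : List String) (k : Nat) (hk : k ≤ sides.length) :
    (List.range (k+1)).foldl
      (fun (st : Int × Int) s =>
        let keep := ((List.range (sides.length+1)).map (fun s => ((sides.take s).countP (fun x => x == "L") : Int))).getD s 0
          + ((List.range (sides.length+1)).map (fun j => ((sides.drop j).countP (fun x => x == "R") : Int))).getD s 0
        if keep > st.1 then (keep, (s : Int)) else st)
      (-1, 0)
    = ((sides.countP (fun x => x == "R") : Int) + (pvBest sides k).1, (pvBest sides k).2) := by
  have hL : ∀ s : Nat, s ≤ sides.length →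
      ((List.range (sides.length+1)).map (fun s => ((sides.take s).countP (fun x => x == "L") : Int))).getD s 0
      = ((sides.take s).countP (fun x => x == "L") : Int) := by
    intro s hs
    rw [List.getD_eq_getElem?_getD, List.getElem?_map, List.getElem?_range (by omega)]; rfl
  have hR : ∀ s : Nat, s ≤ sides.length →
      ((List.range (sides.length+1)).map (fun j => ((sides.drop j).countP (fun x => x == "R") : Int))).getD s 0
      = ((sides.drop s).countP (fun x => x == "R") : Int) := by
    intro s hs
    rw [List.getD_eq_getElem?_getD, List.getElem?_map, List.getElem?_range (by omega)]; rfl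
  induction k with
  | zero =>
    simp only [Nat.zero_add, List.range_one, List.foldl_cons, List.foldl_nil]
    rw [hL 0 (by omega), hR 0 (by omega)]
    simp only [List.take_zero, List.drop_zero, List.countP_nil, Nat.cast_zero, zero_add]
    rw [if_pos (by omega)]
    simp [pvBest]
  | succ k ih =>
    rw [List.range_succ (n := k+1), List.foldl_append, ih (by omega)]
    simp only [List.foldl_cons, List.foldl_nil]
    rw [hL (k+1) (by omega), hR (k+1) (by omega), keep_eq]
    have hbest : pvBest sides (k+1)
        = if pvBal sides (k+1) > (pvBest sides k).1 then (pvBal sides (k+1), (k:Int)+1) else pvBest sides k := rfl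
    by_cases h : pvBal sides (k+1) > (pvBest sides k).1
    · rw [if_pos (by omega), hbest, if_pos h]
      push_cast
      ring_nf
    · rw [if_neg (by omega), hbest, if_neg h]

theorem foldB_inv (sides : List String) (hlr : ∀ x ∈ sides, x = "L" ∨ x = "R") (k : Nat) (hk : k ≤ sides.length) :
    ((PySem.List.enumerate sides).take k).foldl
      (fun (st : Int × Int × Int) p =>
        let balance := st.1 + (if p.2 == "L" then 1 else -1)
        if balance > st.2.1 then (balance, balance, p.1 + 1) else (balance, st.2.1, st.2.2))
      (0, 0, 0)
    = (pvBal sides k, (pvBest sides k).1, (pvBest sides k).2) := by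
  induction k with
  | zero => simp [pvBal, pvBest]
  | succ k ih =>
    have hk' : k < sides.length := by omega
    have henum : (PySem.List.enumerate sides).take (k+1)
        = (PySem.List.enumerate sides).take k ++ [((k : Int), sides[k])] := by
      rw [List.take_add_one, PySem.List.getElem?_enumerate]
      rw [List.getElem?_eq_getElem hk']
      simp
    rw [henum, List.foldl_append, ih (by omega)]
    simp only [List.foldl_cons, List.foldl_nil]
    have hb : pvBal sides k + (if sides[k] == "L" then 1 else -1) = pvBal sides (k+1) :=
      (pvBal_succ sides k hk' (hlr _ (List.getElem_mem hk'))).symm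
    rw [hb]
    have hbest : pvBest sides (k+1)
        = if pvBal sides (k+1) > (pvBest sides k).1 then (pvBal sides (k+1), (k:Int)+1) else pvBest sides k := rfl
    by_cases h : pvBal sides (k+1) > (pvBest sides k).1
    · rw [if_pos h, hbest, if_pos h]
    · rw [if_neg h, hbest, if_neg h]

theorem A_eq (desired_free left_free right_free : List Int) :
    select_slice_indices_for_interleaving_py desired_free left_free right_free
    = pvSliced desired_free (pvSides desired_free left_free)
        ((pvBest (pvSides desired_free left_free) (pvSides desired_free left_free).length).2) := by
  unfold select_slice_indices_for_interleaving_py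
  dsimp only
  rw [prefArr_inv (pvSides desired_free left_free) _ le_rfl]
  rw [List.range_eq_range' (n := (pvSides desired_free left_free).length)]
  rw [sufArr_inv (pvSides desired_free left_free) (pvSides desired_free left_free).length 0 (by omega)]
  simp only [Nat.sub_self, List.replicate_zero, List.append_nil, List.nil_append, Nat.zero_add]
  rw [argmaxA_inv (pvSides desired_free left_free) _ le_rfl]

theorem B_eq (desired_free left_free right_free : List Int) :
    select_slice_indices_for_interleaving_py_alt desired_free left_free right_free
    = pvSliced desired_free (pvSides desired_free left_free)
        ((pvBest (pvSides desired_free left_free) (pvSides desired_free left_free).length).2) := by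
  unfold select_slice_indices_for_interleaving_py_alt
  dsimp only
  rw [← List.take_length (l := PySem.List.enumerate (pvSides desired_free left_free))]
  rw [PySem.List.length_enumerate]
  have h := foldB_inv (pvSides desired_free left_free) (fun x hx => pvSides_mem hx) _ le_rfl
  dsimp only at h
  rw [h]

-- ===== VERDICT (by name: the statement is the Claim_ definition above) =====
theorem select_slice_indices_for_interleaving_py_spec : Claim_equal_select_slice_indices_for_interleaving_py := by
  intro desired_free left_free right_free _
  unfold Spec_select_slice_indices_for_interleaving_py
  rw [A_eq desired_free left_free right_free, B_eq desired_free left_free right_free]
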